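-- pv_equiv track=rewrite | github.com/Joeysdi/fddf | playback.py | skip_to_end_loop
-- ===== SOURCE A (Python) =====
-- def skip_to_end_loop(script, i):
--     depth = 1
--     i += 1
--     while i < len(script):
--         if script[i]["type"] in ["loop_times", "loop_until"]:
--             depth += 1
--         elif script[i]["type"] == "end_loop":
--             depth -= 1
--             if depth == 0:
--                 return i + 1
--         i += 1
--     return i
-- ===== SOURCE B (Python) =====
-- def skip_to_end_loop(script, i):
--     i += 1
--     while i < len(script):
--         t = script[i]["type"]
--         if t in ("loop_times", "loop_until"):
--             i = skip_to_end_loop(script, i)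
--         elif t == "end_loop":
--             return i + 1
--         else:
--             i += 1
--     return i
-- ===== Notes on version B (the rewrite author's own statement) =====
-- stated objective: alternative
-- what changed: Replaces A's flat depth-counter while-loop by recursive descent over the nested loop structure: an inner loop opener is skipped by a recursive call whose return value is the resume index, so no depth variable exists.
-- outside the precondition, e.g. on skip_to_end_loop([{'type': 'end_loop'}, {}], -1): A returns 1, B returns 1
import Mathlib
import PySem

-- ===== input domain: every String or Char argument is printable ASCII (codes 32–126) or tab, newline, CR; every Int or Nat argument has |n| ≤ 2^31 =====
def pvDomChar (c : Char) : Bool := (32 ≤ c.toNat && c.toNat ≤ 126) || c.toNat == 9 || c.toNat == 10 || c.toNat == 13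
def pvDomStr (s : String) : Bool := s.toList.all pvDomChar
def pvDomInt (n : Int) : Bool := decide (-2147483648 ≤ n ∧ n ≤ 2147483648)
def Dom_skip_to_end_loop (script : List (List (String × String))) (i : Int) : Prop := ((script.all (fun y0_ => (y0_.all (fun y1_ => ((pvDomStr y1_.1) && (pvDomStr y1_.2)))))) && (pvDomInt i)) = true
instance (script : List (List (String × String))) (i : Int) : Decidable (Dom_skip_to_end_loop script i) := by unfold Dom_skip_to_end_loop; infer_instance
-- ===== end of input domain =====

-- B replaces A's flat depth counter by recursive descent over the nested loop structure
-- (an inner loop is skipped by a recursive call); alternative decomposition, same cost.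

-- termination helpers for the two loop ports (cited by name in decreasing_by)
theorem pvTermStep {L j : Int} (h : j < L) : (L - (j + 1)).toNat < (L - j).toNat :=
  (Int.toNat_lt_toNat (Int.sub_pos.mpr h)).mpr (sub_lt_sub_left (lt_add_one j) L)
theorem pvTermJump {L j v : Int} (h : j < L) (hv : j + 1 ≤ v) :
    (L - v).toNat < (L - j).toNat :=
  lt_of_le_of_lt (Int.toNat_le_toNat (sub_le_sub_left hv L)) (pvTermStep h)

-- ===== PORT A =====
-- script[j]["type"]: Python's negative-index list access, then first-match key lookup.
-- Where Python would raise (IndexError / KeyError) the helper yields a default; Pre_ excludes those inputs.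
def pvTypeAt (script : List (List (String × String))) (j : Int) : String :=
  (((PySem.List.pyGet? script j).getD []).find? (fun p => p.1 == "type")).map (·.2) |>.getD ""

-- the while-loop of A: state (j, depth), j increases each iteration
def skipA_go (script : List (List (String × String))) (j depth : Int) : Int :=
  if h : j < (script.length : Int) then
    let t := pvTypeAt script j
    if t = "loop_times" ∨ t = "loop_until" then
      skipA_go script (j + 1) (depth + 1)
    else if t = "end_loop" then
      if depth - 1 = 0 then j + 1
      else skipA_go script (j + 1) (depth - 1)
    else skipA_go script (j + 1) depth
  else j
termination_by ((script.length : Int) - j).toNat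
decreasing_by all_goals exact pvTermStep h

def skip_to_end_loop (script : List (List (String × String))) (i : Int) : Int :=
  skipA_go script (i + 1) 1

-- ===== PORT B =====
-- the while-loop of B from Source B, starting at j = i+1; on a loop opener it skips the inner
-- loop by the recursive call (which itself starts one past the opener).  The result carries
-- the invariant j ≤ r so that the nested recursion is well-founded.
def skipB_go (script : List (List (String × String))) (j : Int) : {r : Int // j ≤ r} :=
  if h : j < (script.length : Int) then
    let t := pvTypeAt script j
    if t = "loop_times" ∨ t = "loop_until" then
      let inner := skipB_go script (j + 1)
      let outer := skipB_go script inner.val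
      ⟨outer.val, (le_of_lt (lt_add_one j)).trans (inner.property.trans outer.property)⟩
    else if t = "end_loop" then ⟨j + 1, le_of_lt (lt_add_one j)⟩
    else
      let r := skipB_go script (j + 1)
      ⟨r.val, (le_of_lt (lt_add_one j)).trans r.property⟩
  else ⟨j, le_refl j⟩
termination_by ((script.length : Int) - j).toNat
decreasing_by
  · exact pvTermStep h
  · exact pvTermJump h inner.property
  · exact pvTermStep h

def skip_to_end_loop_alt (script : List (List (String × String))) (i : Int) : Int :=
  (skipB_go script (i + 1)).val

-- ===== PRECONDITION & SPEC =====
-- Pre_ excludes the inputs where Python raises: i + 1 < -len(script) (IndexError on the first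
-- access) and scripts with an entry lacking a "type" key (KeyError when that entry is reached).
-- Mild stated narrowing: the key is required of every entry from the scan's start onward, although
-- entries past the matching end_loop are never inspected by A — a closed-form over-approximation
-- (see claim.json cites).  (A scan starting at a negative position visits the whole list.)
def Pre_skip_to_end_loop (script : List (List (String × String))) (i : Int) : Prop :=
  -((script.length : Int)) - 1 ≤ i ∧
  ∀ d ∈ (if 0 ≤ i + 1 then script.drop (i + 1).toNat else script),
    (d.find? (fun p => p.1 == "type")).isSome
instance (script : List (List (String × String))) (i : Int) : Decidable (Pre_skip_to_end_loop script i) := by unfold Pre_skip_to_end_loop; infer_instance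

def pvWitness_skip_to_end_loop : (List (List (String × String))) × Int :=
  ([[("type", "loop_times")], [("type", "end_loop")], [("type", "end_loop")]], 0)

def Spec_skip_to_end_loop (script : List (List (String × String))) (i : Int) (out : Int) : Prop := out = skip_to_end_loop_alt script i
instance (script : List (List (String × String))) (i : Int) (out : Int) : Decidable (Spec_skip_to_end_loop script i out) := by unfold Spec_skip_to_end_loop; infer_instance

-- ===== CLAIM (what is proved, stated in full; the proofs are below) =====
def Claim_equal_skip_to_end_loop : Prop := ∀ (script : List (List (String × String))) (i : Int), Dom_skip_to_end_loop script i → Pre_skip_to_end_loop script i → Spec_skip_to_end_loop script i (skip_to_end_loop script i)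

-- ===== LEMMAS AND PROOFS =====

-- proof-side abbreviation for B's loop value
def gB (script : List (List (String × String))) (j : Int) : Int := (skipB_go script j).val

theorem gB_lb (script : List (List (String × String))) (j : Int) : j ≤ gB script j :=
  (skipB_go script j).property

theorem gB_unfold (script : List (List (String × String))) (j : Int) :
    gB script j =
      if j < (script.length : Int) then
        (if pvTypeAt script j = "loop_times" ∨ pvTypeAt script j = "loop_until" then
          gB script (gB script (j + 1))
        else if pvTypeAt script j = "end_loop" then j + 1
        else gB script (j + 1))
      else j := by
  unfold gB
  rw [skipB_go.eq_def]
  by_cases h : j < (script.length : Int)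
  · simp only [dif_pos h, if_pos h]
    split_ifs <;> rfl
  · simp only [dif_neg h, if_neg h]

theorem skipA_out (script : List (List (String × String))) (j d : Int)
    (h : ¬ j < (script.length : Int)) : skipA_go script j d = j := by
  rw [skipA_go.eq_def]; simp [h]

-- Main bridge: A's loop at depth d+1 equals one B-skip followed by A's loop at depth d.
theorem skipA_go_eq_gB (script : List (List (String × String))) (j d : Int) (hd : 0 ≤ d) :
    skipA_go script j (d + 1) =
      (if d = 0 then gB script j else skipA_go script (gB script j) d) := by
  rw [gB_unfold]
  by_cases h : j < (script.length : Int)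
  · conv_lhs => rw [skipA_go.eq_def]
    simp only [dif_pos h, if_pos h]
    by_cases h1 : pvTypeAt script j = "loop_times" ∨ pvTypeAt script j = "loop_until"
    · simp only [h1, if_pos]
      have hstep := gB_lb script (j + 1)
      have ih1 := skipA_go_eq_gB script (j + 1) (d + 1) (by omega)
      rw [if_neg (show ¬ (d + 1 = 0) by omega)] at ih1
      have ih2 := skipA_go_eq_gB script (gB script (j + 1)) d hd
      rw [show d + 1 + 1 = (d + 1) + 1 from rfl, ih1, ih2]
    · simp only [h1, if_neg, not_false_iff]
      by_cases h2 : pvTypeAt script j = "end_loop"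
      · simp only [h2, if_pos]
        rw [show d + 1 - 1 = d from by omega]
      · simp only [h2, if_neg, not_false_iff]
        exact skipA_go_eq_gB script (j + 1) d hd
  · simp only [if_neg h]
    rw [skipA_out script j (d + 1) h]
    by_cases hd0 : d = 0
    · simp [hd0]
    · rw [if_neg hd0, skipA_out script j d h]
termination_by (((script.length : Int) - j).toNat, d.toNat)
decreasing_by
  · exact Prod.Lex.left _ _ (by omega)
  · have := gB_lb script (j + 1)
    exact Prod.Lex.left _ _ (by omega)
  · exact Prod.Lex.left _ _ (by omega)

-- ===== VERDICT (by name: the statement is the Claim_ definition above) =====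
theorem skip_to_end_loop_spec : Claim_equal_skip_to_end_loop := by
  intro script i _ _
  unfold Spec_skip_to_end_loop skip_to_end_loop skip_to_end_loop_alt
  have := skipA_go_eq_gB script (i + 1) 0 (le_refl 0)
  simpa [gB] using this
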